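-- pv_equiv track=rewrite | github.com/BBbibiburst/nlpLab1 | TnT/TnT_dict_maker.py | get_status_list
-- ===== SOURCE A (Python) =====
-- def get_status_list(word_list):
--     status_list = ''
--     for word in word_list:
--         word_len = len(word)
--         if word_len == 1:
--             status_list += 'S'
--         else:
--             for i in range(word_len):
--                 if i == 0:
--                     status_list += 'B'
--                 elif i == word_len - 1:
--                     status_list += 'E'
--                 else:
--                     status_list += 'M'
--     return status_list
-- ===== SOURCE B (Python) =====
-- def get_status_list(word_list):
--     def chunk(w):
--         n = len(w)
--         if n == 0:
--             return ''
--         if n == 1: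
--             return 'S'
--         return 'B' + 'M' * (n - 2) + 'E'
--     return ''.join(chunk(w) for w in word_list)
-- ===== Notes on version B (the rewrite author's own statement) =====
-- stated objective: idiomatic
-- what changed: Replaces the per-character index loop with B/M/E branches by a closed-form per-word tag chunk ('S', '' or 'B'+'M'*(n-2)+'E') accumulated with ''.join.
import Mathlib
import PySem

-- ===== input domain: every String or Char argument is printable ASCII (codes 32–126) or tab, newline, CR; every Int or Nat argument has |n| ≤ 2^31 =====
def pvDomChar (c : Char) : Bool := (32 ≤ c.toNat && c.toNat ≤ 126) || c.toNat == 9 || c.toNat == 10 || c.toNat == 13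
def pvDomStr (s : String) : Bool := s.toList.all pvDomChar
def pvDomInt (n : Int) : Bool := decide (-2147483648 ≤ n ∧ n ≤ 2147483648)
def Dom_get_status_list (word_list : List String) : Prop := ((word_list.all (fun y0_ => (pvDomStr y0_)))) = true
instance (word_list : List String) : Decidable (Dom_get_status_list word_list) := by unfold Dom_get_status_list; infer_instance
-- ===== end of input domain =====

-- B replaces A's per-character index loop (with i==0 / i==len-1 branching) by a closed-form
-- per-word chunk 'S' / '' / 'B'+'M'*(n-2)+'E' joined together (objective: idiomatic).

-- ===== PORT A =====
-- the body of A's inner 'for i in range(word_len)' loop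
def pvStepA (word_len : Int) (status_list : String) (i : Int) : String :=
  if i = 0 then status_list ++ "B"
  else if i = word_len - 1 then status_list ++ "E"
  else status_list ++ "M"

def get_status_list (word_list : List String) : String :=
  word_list.foldl
    (fun status_list word =>
      let word_len : Int := PySem.Str.len word
      if word_len = 1 then status_list ++ "S"
      else (PySem.List.pyRange 0 word_len 1).foldl (pvStepA word_len) status_list)
    ""

-- ===== PORT B =====
-- Source B's chunk(w): closed-form tag string for one word
def pvChunk (w : String) : String :=
  let n : Int := PySem.Str.len w
  if n = 0 then ""
  else if n = 1 then "S"
  else "B" ++ String.ofList (List.replicate (n - 2).toNat 'M') ++ "E"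

def get_status_list_alt (word_list : List String) : String :=
  PySem.Str.join "" (word_list.map pvChunk)

-- ===== PRECONDITION & SPEC =====
def Spec_get_status_list (word_list : List String) (out : String) : Prop := out = get_status_list_alt word_list
instance (word_list : List String) (out : String) : Decidable (Spec_get_status_list word_list out) := by unfold Spec_get_status_list; infer_instance

-- ===== CLAIM (what is proved, stated in full; the proofs are below) =====
def Claim_equal_get_status_list : Prop := ∀ (word_list : List String), Dom_get_status_list word_list → Spec_get_status_list word_list (get_status_list word_list)

-- ===== LEMMAS AND PROOFS =====

-- prefix of A's inner loop: the first m indices (all < word_len - 1) emit 'B' then m-1 'M's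
lemma pv_inner_prefix (n : Nat) (m : Nat) (hm : 1 ≤ m) (hmn : (m : Int) ≤ (n : Int) - 1)
    (acc : String) :
    (PySem.List.pyRange 0 (m : Int) 1).foldl (pvStepA (n : Int)) acc
      = acc ++ "B" ++ String.ofList (List.replicate (m - 1) 'M') := by
  induction m with
  | zero => omega
  | succ m ih =>
    rcases Nat.eq_or_lt_of_le hm with h1 | h1
    · -- m + 1 = 1
      have hm0 : m = 0 := by omega
      subst hm0
      rw [show ((0 + 1 : Nat) : Int) = (0 : Int) + 1 by omega,
        PySem.List.pyRange_one_singleton]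
      simp [pvStepA]
    · have hm1 : 1 ≤ m := by omega
      have hsucc : ((m + 1 : Nat) : Int) = (m : Int) + 1 := by push_cast; ring
      rw [hsucc, PySem.List.pyRange_one_succ_right (by positivity), List.foldl_append]
      rw [ih hm1 (by push_cast at hmn ⊢; omega)]
      have hne0 : (m : Int) ≠ 0 := by omega
      have hneE : (m : Int) ≠ (n : Int) - 1 := by push_cast at hmn; omega
      simp only [List.foldl_cons, List.foldl_nil, pvStepA, if_neg hne0, if_neg hneE]
      have hrep : List.replicate m 'M' = List.replicate (m - 1) 'M' ++ ['M'] := by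
        conv_lhs => rw [show m = (m - 1) + 1 by omega]
        rw [List.replicate_succ']
      apply String.toList_inj.mp
      simp [hrep]

-- A's whole inner loop for a word of length n ≥ 2
lemma pv_inner (n : Nat) (hn : 2 ≤ n) (acc : String) :
    (PySem.List.pyRange 0 (n : Int) 1).foldl (pvStepA (n : Int)) acc
      = acc ++ "B" ++ String.ofList (List.replicate (n - 2) 'M') ++ "E" := by
  have hrange : PySem.List.pyRange 0 (n : Int) 1
      = PySem.List.pyRange 0 ((n - 1 : Nat) : Int) 1 ++ [((n - 1 : Nat) : Int)] := by
    rw [show ((n : Int)) = ((n - 1 : Nat) : Int) + 1 by omega,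
      PySem.List.pyRange_one_succ_right (by positivity)]
  rw [hrange, List.foldl_append, pv_inner_prefix n (n - 1) (by omega) (by omega)]
  have heq : ((n - 1 : Nat) : Int) = (n : Int) - 1 := by omega
  simp only [List.foldl_cons, List.foldl_nil, pvStepA, heq]
  rw [if_neg (show ¬((n : Int) - 1 = 0) by omega)]
  simp [show n - 1 - 1 = n - 2 by omega]

-- one step of A's outer loop equals appending B's chunk
lemma pv_step (acc w : String) :
    (if PySem.Str.len w = 1 then acc ++ "S"
     else (PySem.List.pyRange 0 (PySem.Str.len w) 1).foldl (pvStepA (PySem.Str.len w)) acc)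
      = acc ++ pvChunk w := by
  have hlen : PySem.Str.len w = (w.toList.length : Int) := by simp
  rcases Nat.lt_or_ge w.toList.length 2 with h2 | h2
  · interval_cases h : w.toList.length
    · simp [pvChunk, h, PySem.List.pyRange_one_eq_nil]
    · simp [pvChunk, h]
  · have h1 : PySem.Str.len w ≠ 1 := by rw [hlen]; omega
    rw [if_neg h1, hlen, pv_inner _ h2]
    have h0 : (w.toList.length : Int) ≠ 0 := by omega
    simp only [pvChunk, hlen, if_neg h0]
    rw [if_neg (by omega : ¬ ((w.toList.length : Int) = 1))]
    have : ((w.toList.length : Int) - 2).toNat = w.toList.length - 2 := by omega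
    rw [this]
    apply String.toList_inj.mp
    simp

-- ''.join over a cons
lemma pv_join_cons (c : String) (rest : List String) :
    PySem.Str.join "" (c :: rest) = c ++ PySem.Str.join "" rest := by
  apply String.toList_inj.mp
  cases rest with
  | nil => simp [PySem.Chars.join_singleton, PySem.Chars.join_nil]
  | cons d ds => simp [PySem.Chars.join_cons_cons]

-- A's outer fold accumulates exactly B's joined chunks
lemma pv_fold (ws : List String) : ∀ acc : String,
    ws.foldl
      (fun status_list word =>
        let word_len : Int := PySem.Str.len word
        if word_len = 1 then status_list ++ "S"
        else (PySem.List.pyRange 0 word_len 1).foldl (pvStepA word_len) status_list)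
      acc
      = acc ++ PySem.Str.join "" (ws.map pvChunk) := by
  induction ws with
  | nil =>
    intro acc
    apply String.toList_inj.mp
    simp [PySem.Chars.join_nil]
  | cons w ws ih =>
    intro acc
    simp only [List.foldl_cons, List.map_cons]
    rw [show (let word_len : Int := PySem.Str.len w;
        if word_len = 1 then acc ++ "S"
        else (PySem.List.pyRange 0 word_len 1).foldl (pvStepA word_len) acc)
      = acc ++ pvChunk w from pv_step acc w]
    rw [ih, pv_join_cons]
    apply String.toList_inj.mp
    simp

-- ===== VERDICT (by name: the statement is the Claim_ definition above) =====
theorem get_status_list_spec : Claim_equal_get_status_list := by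
  intro word_list _
  show get_status_list word_list = get_status_list_alt word_list
  unfold get_status_list get_status_list_alt
  rw [pv_fold]
  apply String.toList_inj.mp
  simp
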